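-- pv_equiv track=rewrite | github.com/Ka-raS/School-Code | Nam 2 Ky 2 - Lap trinh Python/12. PERFECT PRIME.py | is_perfect_prime
-- ===== SOURCE A (Python) =====
-- import math
--
-- def is_prime(number: int) -> bool:
--     if number <= 1:
--         return False
--     if number == 2 or number == 3:
--         return True
--     if number % 2 == 0 or number % 3 == 0:
--         return False
--
--     for dividend in range(5, int(math.sqrt(number)), 6):
--         if number % dividend == 0 or number % (dividend + 2) == 0:
--             return False
--     return True
--
-- def is_perfect_prime(number: int) -> bool:
--     if not is_prime(number):
--         return False
--
--     digit_sum: int = 0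
--     reverse: str = ''
--
--     while number > 0:
--         digit: int = number % 10
--         if not is_prime(digit):
--             return False
--
--         number //= 10
--         digit_sum += digit
--         reverse += str(digit)
--
--     return is_prime(digit_sum) and is_prime(int(reverse))
-- ===== SOURCE B (Python) =====
-- import math
--
-- def is_prime(number: int) -> bool:
--     if number < 2 or (number > 3 and (number % 2 == 0 or number % 3 == 0)):
--         return False
--     return all(number % d and number % (d + 2)
--                for d in range(5, int(math.sqrt(number)), 6))
--
-- def is_perfect_prime(number: int) -> bool:
--     s = str(number)
--     if not is_prime(number) or any(c not in "2357" for c in s):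
--         return False
--     return is_prime(sum(map(int, s))) and is_prime(int(s[::-1]))
-- ===== Notes on version B (the rewrite author's own statement) =====
-- stated objective: simpler
-- what changed: A's single fused while-loop (modulo digit extraction interleaving per-digit is_prime calls, a running digit sum and building a reversed string) is replaced by flat passes over s = str(number): a membership scan of the digits against the literal '2357', a sum over map(int, s) for the digit sum and the reversed-slice of s for the reverse; B's is_prime collapses A's early-return cascade into a single guard plus an all() over the same stepped trial-divisor range.
import Mathlib
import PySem

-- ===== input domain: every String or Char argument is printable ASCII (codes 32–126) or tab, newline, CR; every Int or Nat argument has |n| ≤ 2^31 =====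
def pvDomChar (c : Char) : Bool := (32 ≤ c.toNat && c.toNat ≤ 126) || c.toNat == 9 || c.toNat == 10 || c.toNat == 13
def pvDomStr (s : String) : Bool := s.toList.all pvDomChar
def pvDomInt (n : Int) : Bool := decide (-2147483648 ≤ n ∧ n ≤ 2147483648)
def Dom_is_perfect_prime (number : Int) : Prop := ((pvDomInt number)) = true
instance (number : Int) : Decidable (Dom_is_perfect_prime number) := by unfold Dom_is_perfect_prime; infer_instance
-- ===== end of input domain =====

-- B replaces A's fused digit-extraction while-loop (per-digit is_prime calls, running sum, string building)
-- by flat passes over s = str(number): a "2357" membership scan, sum(map(int, s)), and int(s[::-1]); objective: simpler.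

-- ===== PORT A =====
-- int(math.sqrt(n)): exact as the integer square root for the nonnegative n ≤ 2^31 these programs reach
def pySqrtInt (n : Int) : Int := Int.ofNat n.toNat.sqrt

-- A's 'for dividend in range(...)' with its early 'return False'
def is_prime_loop (number : Int) : List Int → Bool
  | [] => true
  | d :: rest =>
    if PySem.Int.mod number d == 0 || PySem.Int.mod number (d + 2) == 0 then false
    else is_prime_loop number rest

def is_prime (number : Int) : Bool :=
  if number ≤ 1 then false
  else if number == 2 || number == 3 then true
  else if PySem.Int.mod number 2 == 0 || PySem.Int.mod number 3 == 0 then false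
  else is_prime_loop number (PySem.List.pyRange 5 (pySqrtInt number) 6)

-- the while-loop of A, with its state (number, digit_sum, reverse)
def ppLoop (number : Int) (digit_sum : Int) (reverse : String) : Bool :=
  if 0 < number then
    let digit := PySem.Int.mod number 10
    if !is_prime digit then false
    else ppLoop (PySem.Int.floordiv number 10) (digit_sum + digit) (reverse ++ PySem.Int.toStr digit)
  else
    -- int(reverse): reverse is a nonempty decimal string whenever A reaches this line
    is_prime digit_sum && is_prime ((PySem.Int.ofStr? reverse).getD 0)
termination_by number.toNat
decreasing_by
  have h10 : Int.fdiv number 10 = number / 10 := by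
    rw [Int.fdiv_eq_ediv]; simp
  simp only [PySem.Int.floordiv, h10]
  omega

def is_perfect_prime (number : Int) : Bool :=
  if !is_prime number then false
  else ppLoop number 0 ""

-- ===== PORT B =====
-- B's is_prime: one guard, then all(...) over the same 6k±1 range
def isPrimeB (number : Int) : Bool :=
  if number < 2 || (3 < number && (PySem.Int.mod number 2 == 0 || PySem.Int.mod number 3 == 0)) then false
  else
    (PySem.List.pyRange 5 (pySqrtInt number) 6).all
      (fun d => !(PySem.Int.mod number d == 0) && !(PySem.Int.mod number (d + 2) == 0))

-- int(c) for a one-character string (always a decimal digit where B evaluates it)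
def pyIntChar (c : Char) : Int := (PySem.Int.ofStr? (String.ofList [c])).getD 0

def is_perfect_prime_alt (number : Int) : Bool :=
  let s := PySem.Int.toStr number
  -- 'c not in "2357"' : single-char membership in the literal string, as char membership
  if !isPrimeB number || s.toList.any (fun c => !(("2357".toList).contains c)) then false
  else
    isPrimeB ((s.toList.map pyIntChar).sum) &&
      isPrimeB ((PySem.Int.ofStr? ((PySem.Str.slice? s none none (-1)).getD "")).getD 0)

-- ===== PRECONDITION & SPEC =====
def Spec_is_perfect_prime (number : Int) (out : Bool) : Prop := out = is_perfect_prime_alt number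
instance (number : Int) (out : Bool) : Decidable (Spec_is_perfect_prime number out) := by unfold Spec_is_perfect_prime; infer_instance

-- ===== CLAIM (what is proved, stated in full; the proofs are below) =====
def Claim_equal_is_perfect_prime : Prop := ∀ (number : Int), Dom_is_perfect_prime number → Spec_is_perfect_prime number (is_perfect_prime number)

-- ===== LEMMAS AND PROOFS =====

theorem is_prime_loop_all (n : Int) (L : List Int) :
    is_prime_loop n L
      = L.all (fun d => !(PySem.Int.mod n d == 0) && !(PySem.Int.mod n (d + 2) == 0)) := by
  induction L with
  | nil => rfl
  | cons d t ih =>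
    by_cases h : (PySem.Int.mod n d == 0 || PySem.Int.mod n (d + 2) == 0) = true
    · simp [is_prime_loop, h]
      intro h1 h2
      simp [h1, h2] at h
    · simp only [is_prime_loop, h, Bool.false_eq_true, if_false, ih, List.all_cons]
      simp only [Bool.or_eq_true, not_or] at h
      simp [h.1, h.2]

-- B's is_prime computes the same values as A's
theorem isPrimeB_eq (n : Int) : isPrimeB n = is_prime n := by
  unfold isPrimeB is_prime
  rw [is_prime_loop_all]
  by_cases h1 : n ≤ 1
  · simp [h1, show n < 2 by omega]
  · by_cases h2 : n = 2
    · subst h2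
      rw [show pySqrtInt 2 = 1 from by norm_num [pySqrtInt, Int.toNat]]
      decide
    · by_cases h3 : n = 3
      · subst h3
        rw [show pySqrtInt 3 = 1 from by norm_num [pySqrtInt, Int.toNat]]
        decide
      · have hgt : 3 < n := by omega
        have hne : (n == 2 || n == 3) = false := by simp [h2, h3]
        simp [show ¬ n < 2 by omega, hgt, hne, show ¬ n ≤ 1 from h1]

-- Nat.toDigits 10 is the base-10 digit list (LSB-first) mapped to chars and reversed
theorem toDigitsCore_eq (fuel : Nat) : ∀ (n : Nat) (acc : List Char), 0 < n → n < fuel →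
    Nat.toDigitsCore 10 fuel n acc
      = ((Nat.digits 10 n).map Nat.digitChar).reverse ++ acc := by
  induction fuel with
  | zero => intro n acc hn hf; omega
  | succ f ih =>
    intro n acc hn hf
    rw [Nat.toDigitsCore]
    rw [Nat.digits_def' (by norm_num) hn]
    by_cases h0 : n / 10 = 0
    · simp [h0, Nat.digits_zero]
    · have hlt : n / 10 < f := by omega
      simp only [if_neg h0]
      rw [ih (n / 10) _ (by omega) hlt]
      simp

theorem toChars_pos (n : Int) (hn : 0 < n) :
    PySem.Int.toChars n = ((Nat.digits 10 n.toNat).map Nat.digitChar).reverse := by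
  have h0 : 0 < n.toNat := by omega
  simp only [PySem.Int.toChars, if_neg (by omega : ¬ n < 0), Nat.toDigits]
  rw [toDigitsCore_eq (n.toNat + 1) n.toNat [] h0 (by omega)]
  simp

-- str(d) and int(c) on single decimal digits
theorem toStr_digit (d : Nat) (hd : d < 10) :
    PySem.Int.toStr (Int.ofNat d) = String.ofList [Nat.digitChar d] := by
  interval_cases d <;> decide

theorem pyIntChar_digitChar (d : Nat) (hd : d < 10) :
    pyIntChar (Nat.digitChar d) = Int.ofNat d := by
  interval_cases d <;> decide

-- A's while-loop characterized as a function of the LSB-first digit list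
theorem ppLoop_bounded (k : Nat) : ∀ (n : Int) (ds : Int) (rev : String), 0 ≤ n → n.toNat ≤ k →
    ppLoop n ds rev =
      (if (Nat.digits 10 n.toNat).all (fun d => is_prime (Int.ofNat d)) then
         is_prime (ds + ((Nat.digits 10 n.toNat).map (Int.ofNat)).sum) &&
           is_prime ((PySem.Int.ofStr? (rev ++ String.ofList ((Nat.digits 10 n.toNat).map Nat.digitChar))).getD 0)
       else false) := by
  induction k with
  | zero =>
    intro n ds rev hn hk
    have h0 : n = 0 := by omega
    subst h0
    rw [ppLoop]
    simp
  | succ k ih =>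
    intro n ds rev hn hk
    by_cases hpos : 0 < n
    · have hmod : PySem.Int.mod n 10 = ((n.toNat % 10 : Nat) : Int) := by
        simp only [PySem.Int.mod]
        rw [Int.fmod_eq_emod]
        simp
        omega
      have hdiv : PySem.Int.floordiv n 10 = ((n.toNat / 10 : Nat) : Int) := by
        simp only [PySem.Int.floordiv]
        rw [Int.fdiv_eq_ediv]
        simp
        omega
      have hdig : Nat.digits 10 n.toNat = n.toNat % 10 :: Nat.digits 10 (n.toNat / 10) :=
        Nat.digits_def' (by norm_num) (by omega)
      rw [ppLoop, if_pos hpos]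
      simp only [hmod, hdiv, hdig]
      by_cases hp : is_prime ((n.toNat % 10 : Nat) : Int) = true
      · simp only [hp, Bool.not_true, Bool.false_eq_true, if_false]
        rw [ih ((n.toNat / 10 : Nat) : Int) _ _ (by omega) (by simp; omega)]
        have hts := toStr_digit (n.toNat % 10) (Nat.mod_lt _ (by norm_num))
        simp only [Int.ofNat_eq_natCast] at hts
        rw [hts]
        simp only [Int.toNat_natCast, Int.ofNat_eq_natCast, List.all_cons, hp, Bool.true_and,
          List.map_cons, List.sum_cons, ← String.ofList_append, List.singleton_append,
          String.append_assoc, add_assoc]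
      · have hpf : is_prime ((n.toNat % 10 : Nat) : Int) = false := eq_false_of_ne_true hp
        simp only [List.all_cons, Int.ofNat_eq_natCast, hpf, Bool.not_false, if_true,
          Bool.false_and, Bool.false_eq_true, if_false]
    · have h0 : n = 0 := by omega
      subst h0
      rw [ppLoop]
      simp

theorem is_prime_ge (n : Int) (h : is_prime n = true) : 2 ≤ n := by
  unfold is_prime at h
  by_cases h1 : n ≤ 1
  · simp [h1] at h
  · omega

-- per digit: is_prime(d) ↔ the digit char is in "2357"
theorem digit_prime_mem (d : Nat) (hd : d < 10) :
    ("2357".toList).contains (Nat.digitChar d) = is_prime (Int.ofNat d) := by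
  have h5 : pySqrtInt ((5 : Nat) : Int) = 2 := by
    simp only [pySqrtInt, Int.toNat_natCast]; norm_num
  have h7 : pySqrtInt ((7 : Nat) : Int) = 2 := by
    simp only [pySqrtInt, Int.toNat_natCast]; norm_num
  interval_cases d <;> simp only [is_prime, Int.ofNat_eq_natCast, h5, h7] <;> decide

theorem digit_all (L : List Nat) (h : ∀ d ∈ L, d < 10) :
    (L.map Nat.digitChar).all (fun c => ("2357".toList).contains c)
      = L.all (fun d => is_prime (Int.ofNat d)) := by
  induction L with
  | nil => rfl
  | cons d t ih =>
    simp only [List.map_cons, List.all_cons, digit_prime_mem d (h d (by simp)),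
      ih (fun x hx => h x (by simp [hx]))]

theorem digit_sum (L : List Nat) (h : ∀ d ∈ L, d < 10) :
    ((L.map Nat.digitChar).map pyIntChar).sum = (L.map Int.ofNat).sum := by
  induction L with
  | nil => rfl
  | cons d t ih =>
    simp only [List.map_cons, List.sum_cons, pyIntChar_digitChar d (h d (by simp)),
      ih (fun x hx => h x (by simp [hx]))]

theorem ab_eq (number : Int) : is_perfect_prime number = is_perfect_prime_alt number := by
  by_cases hp : is_prime number = true
  · have h2 : 2 ≤ number := is_prime_ge _ hp
    have hL10 : ∀ d ∈ Nat.digits 10 number.toNat, d < 10 :=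
      fun d hd => Nat.digits_lt_base (by norm_num) hd
    unfold is_perfect_prime is_perfect_prime_alt
    simp only [hp, Bool.not_true, Bool.false_eq_true, if_false, isPrimeB_eq]
    rw [ppLoop_bounded number.toNat number 0 "" (by omega) le_rfl]
    have hs : (PySem.Int.toStr number).toList
        = ((Nat.digits 10 number.toNat).map Nat.digitChar).reverse := by
      rw [PySem.Int.toList_toStr, toChars_pos number (by omega)]
    rw [PySem.Str.slice?_none_none_neg_one]
    simp only [hs, Option.getD_some, List.any_reverse, List.map_reverse, List.sum_reverse,
      List.reverse_reverse]
    have hanyall : ((Nat.digits 10 number.toNat).map Nat.digitChar).any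
          (fun c => !(("2357".toList).contains c))
        = !((Nat.digits 10 number.toNat).all fun d => is_prime (Int.ofNat d)) := by
      rw [← digit_all _ hL10]
      simp [List.any_eq_not_all_not]
    rw [hanyall, List.map_map]
    have hms : ((Nat.digits 10 number.toNat).map (pyIntChar ∘ Nat.digitChar)).sum
        = ((Nat.digits 10 number.toNat).map Int.ofNat).sum := by
      rw [← List.map_map]; exact digit_sum _ hL10
    rw [hms]
    by_cases hall : ((Nat.digits 10 number.toNat).all fun d => is_prime (Int.ofNat d)) = true
    · simp only [hall, Bool.not_true, Bool.or_false, Bool.false_eq_true, if_false, zero_add]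
      simp only [Int.ofNat_eq_natCast] at hall ⊢
      simp [String.empty_append]
    · simp only [Int.ofNat_eq_natCast] at hall ⊢
      simp [hall]
  · have hpf : is_prime number = false := eq_false_of_ne_true hp
    unfold is_perfect_prime is_perfect_prime_alt
    simp [hpf, isPrimeB_eq]

-- ===== VERDICT (by name: the statement is the Claim_ definition above) =====
theorem is_perfect_prime_spec : Claim_equal_is_perfect_prime := by
  intro number _
  unfold Spec_is_perfect_prime
  exact ab_eq number
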